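-- pv_equiv track=rewrite | github.com/SMU-Algorithm-Study/Algorithm | week42/비밀지도_nahye03.py | solution
-- ===== SOURCE A (Python) =====
-- def solution(n, arr1, arr2):
--     answer = []
--     arr_bin =[]
--
--     #비트 연산자 사용
--     for i in range(n):
--         arr_bin.append(bin(arr1[i]|arr2[i])[2:].zfill(n))
--
--     for i in arr_bin:
--         answer.append(i.replace('1','#').replace('0',' '))
--
--     return answer
-- ===== SOURCE B (Python) =====
-- def solution(n, arr1, arr2):
--     answer = []
--     for i in range(n):
--         v = arr1[i] | arr2[i]
--         row = ''
--         while v > 0: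
--             row = ('#' if v & 1 else ' ') + row
--             v >>= 1
--         answer.append(' ' * (n - len(row)) + row)
--     return answer
-- ===== Notes on version B (the rewrite author's own statement) =====
-- stated objective: simpler
-- what changed: Replaces A's bin()/[2:]/zfill/replace string-formatting pipeline and its two passes with one pass that builds each row directly by a bit loop (test v&1, halve, prepend '#' or ' ') and left-pads with spaces.
-- outside the precondition, e.g. on solution(2, [1, -2], [0, 0]): A returns [' #', 'b# '], B returns [' #', '  ']
import Mathlib
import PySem

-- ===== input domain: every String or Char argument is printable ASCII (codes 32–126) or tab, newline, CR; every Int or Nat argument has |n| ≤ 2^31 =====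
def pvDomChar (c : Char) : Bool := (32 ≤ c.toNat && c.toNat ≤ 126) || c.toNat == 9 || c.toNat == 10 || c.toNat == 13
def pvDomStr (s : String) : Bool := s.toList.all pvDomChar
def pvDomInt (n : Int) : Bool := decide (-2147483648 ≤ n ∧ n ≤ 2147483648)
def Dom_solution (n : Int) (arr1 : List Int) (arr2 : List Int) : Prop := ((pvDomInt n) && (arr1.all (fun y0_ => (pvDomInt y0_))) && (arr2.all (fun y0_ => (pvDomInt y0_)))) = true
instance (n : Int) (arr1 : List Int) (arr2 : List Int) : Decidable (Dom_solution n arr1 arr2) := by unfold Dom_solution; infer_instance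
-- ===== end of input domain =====

-- B replaces A's bin()/[2:]/zfill/replace string pipeline with a direct bit loop per row (simpler, one pass).
-- Pre_ excludes inputs where A raises IndexError (n exceeding a list length) and, stated below, negative entries.


-- ===== PORT A =====
-- for i in range(n): arr_bin.append(bin(arr1[i]|arr2[i])[2:].zfill(n))
-- for i in arr_bin: answer.append(i.replace('1','#').replace('0',' '))
def solution (n : Int) (arr1 : List Int) (arr2 : List Int) : List String :=
  let answer : List String := []
  let arr_bin : List (List Char) := []
  let arr_bin := (PySem.List.pyRange 0 n 1).foldl (fun acc i =>
      acc ++ [PySem.Chars.zfill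
        (PySem.List.slice (PySem.Int.toBinChars0b
          (PySem.Int.bor (PySem.List.pyGetD arr1 i 0) (PySem.List.pyGetD arr2 i 0)))
          (some 2) none) n]) arr_bin
  let answer := arr_bin.foldl (fun acc s =>
      acc ++ [String.ofList (PySem.Chars.replace (PySem.Chars.replace s ['1'] ['#']) ['0'] [' '])]) answer
  answer

-- ===== PORT B =====
-- while v > 0: row = ('#' if v & 1 else ' ') + row; v >>= 1
def rowGo (m : Nat) (row : List Char) : List Char :=
  if m = 0 then row
  else rowGo (m / 2) ((if m % 2 = 1 then '#' else ' ') :: row)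
termination_by m
decreasing_by exact Nat.div_lt_self (by omega) (by omega)

def solution_alt (n : Int) (arr1 : List Int) (arr2 : List Int) : List String :=
  (PySem.List.pyRange 0 n 1).foldl (fun acc i =>
    let v := PySem.Int.bor (PySem.List.pyGetD arr1 i 0) (PySem.List.pyGetD arr2 i 0)
    let row := rowGo v.toNat []
    acc ++ [String.ofList (List.replicate (n - (row.length : Int)).toNat ' ' ++ row)]) []

-- ===== PRECONDITION & SPEC =====
-- Pre_ excludes inputs where A raises IndexError (n larger than a list length) and rows whose entry among
-- the first n is negative, where A's bin()[2:] strips the minus sign into a literal 'b' character — an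
-- artefact of string slicing outside the task's natural domain of nonnegative map values.
def Pre_solution (n : Int) (arr1 : List Int) (arr2 : List Int) : Prop :=
  n ≤ (arr1.length : Int) ∧ n ≤ (arr2.length : Int) ∧
    ∀ j < n.toNat, 0 ≤ arr1.getD j 0 ∧ 0 ≤ arr2.getD j 0
instance (n : Int) (arr1 : List Int) (arr2 : List Int) : Decidable (Pre_solution n arr1 arr2) := by
  unfold Pre_solution; infer_instance

def pvWitness_solution : Int × List Int × List Int := (2, ([9, 20], [30, 1]))

def Spec_solution (n : Int) (arr1 : List Int) (arr2 : List Int) (out : List String) : Prop := out = solution_alt n arr1 arr2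
instance (n : Int) (arr1 : List Int) (arr2 : List Int) (out : List String) : Decidable (Spec_solution n arr1 arr2 out) := by unfold Spec_solution; infer_instance

-- ===== CLAIM (what is proved, stated in full; the proofs are below) =====
def Claim_equal_solution : Prop := ∀ (n : Int) (arr1 : List Int) (arr2 : List Int), Dom_solution n arr1 arr2 → Pre_solution n arr1 arr2 → Spec_solution n arr1 arr2 (solution n arr1 arr2)

-- ===== LEMMAS AND PROOFS =====

-- binary digits of m, most significant first (characterises Nat.toDigits 2)
def binChars (m : Nat) : List Char :=
  if m < 2 then [Nat.digitChar (m % 2)]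
  else binChars (m / 2) ++ [Nat.digitChar (m % 2)]
termination_by m
decreasing_by exact Nat.div_lt_self (by omega) (by omega)

def repl (c : Char) : Char := if c = '1' then '#' else if c = '0' then ' ' else c

lemma comp_repl :
    ((fun c => if c = '0' then ' ' else c) ∘ fun c => if c = '1' then '#' else c) = repl := by
  funext c
  by_cases h1 : c = '1'
  · subst h1; decide
  · by_cases h0 : c = '0'
    · subst h0; decide
    · simp [repl, h1, h0]

lemma toDigitsCore_eq_binChars : ∀ (fuel m : Nat) (acc : List Char), m < fuel →
    Nat.toDigitsCore 2 fuel m acc = binChars m ++ acc := by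
  intro fuel
  induction fuel with
  | zero => intro m acc h; omega
  | succ fuel ih =>
    intro m acc h
    rw [Nat.toDigitsCore]
    by_cases h2 : m / 2 = 0
    · have hm : m < 2 := by omega
      rw [binChars, if_pos hm]
      simp [h2]
    · have hm : ¬ m < 2 := by omega
      rw [if_neg h2, ih (m / 2) _ (by omega)]
      conv_rhs => rw [binChars, if_neg hm]
      simp

lemma toDigits_eq_binChars (m : Nat) : Nat.toDigits 2 m = binChars m := by
  rw [Nat.toDigits, toDigitsCore_eq_binChars (m + 1) m [] (Nat.lt_succ_self m), List.append_nil]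

lemma binChars_head (m : Nat) (h : 1 ≤ m) : ∃ t, binChars m = '1' :: t := by
  induction m using Nat.strong_induction_on with
  | _ m ih =>
    rw [binChars]
    by_cases hm : m < 2
    · have h1 : m = 1 := by omega
      subst h1
      refine ⟨[], ?_⟩
      rw [if_pos hm]
      decide
    · obtain ⟨t, ht⟩ := ih (m / 2) (by omega) (by omega)
      rw [if_neg hm, ht]
      exact ⟨t ++ [Nat.digitChar (m % 2)], rfl⟩

lemma repl_digit (m : Nat) : repl (Nat.digitChar (m % 2)) = if m % 2 = 1 then '#' else ' ' := by
  rcases Nat.mod_two_eq_zero_or_one m with h | h <;> rw [h] <;> decide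

lemma rowGo_eq (m : Nat) (h : 1 ≤ m) : ∀ acc, rowGo m acc = (binChars m).map repl ++ acc := by
  induction m using Nat.strong_induction_on with
  | _ m ih =>
    intro acc
    rw [rowGo, binChars, if_neg (by omega : ¬ m = 0)]
    by_cases hm : m < 2
    · have h1 : m = 1 := by omega
      subst h1
      rw [if_pos hm, rowGo]
      norm_num [repl, Nat.digitChar]
    · rw [if_neg hm, ih (m / 2) (by omega) (by omega)]
      have hd := repl_digit m
      by_cases h2 : m % 2 = 1 <;>
        simp [h2] at hd ⊢ <;> simp [hd]

lemma replace_go_single : ∀ (fuel : Nat) (l acc : List Char) (a b : Char), l.length ≤ fuel →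
    PySem.Chars.replace.go [a] [b] fuel l acc
      = acc.reverse ++ l.map (fun c => if c = a then b else c) := by
  intro fuel
  induction fuel with
  | zero =>
    intro l acc a b h
    have hl : l = [] := by cases l <;> simp_all
    subst hl
    simp [PySem.Chars.replace.go]
  | succ fuel ih =>
    intro l acc a b h
    cases l with
    | nil => simp [PySem.Chars.replace.go]
    | cons c t =>
      rw [PySem.Chars.replace.go]
      by_cases hc : c = a
      · subst hc
        have hp : List.isPrefixOf [c] (c :: t) = true := by simp [List.isPrefixOf]
        rw [if_pos hp, show List.drop [c].length (c :: t) = t from rfl,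
          show [b].reverse ++ acc = b :: acc from rfl]
        simp only [List.length_cons] at h
        rw [ih t (b :: acc) c b (by omega)]
        simp
      · have hp : List.isPrefixOf [a] (c :: t) = false := by
          simp [List.isPrefixOf]
          exact fun hh => hc hh.symm
        rw [if_neg (by simp [hp])]
        simp only [List.length_cons] at h
        rw [ih t (c :: acc) a b (by omega)]
        simp [hc]

lemma replace_single (s : List Char) (a b : Char) :
    PySem.Chars.replace s [a] [b] = s.map (fun c => if c = a then b else c) := by
  rw [PySem.Chars.replace]
  simp only [List.isEmpty_cons]
  rw [replace_go_single s.length s [] a b le_rfl]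
  simp

lemma zfill_no_sign (c : Char) (t : List Char) (n : Int) (hc : ¬(c = '+' ∨ c = '-')) :
    PySem.Chars.zfill (c :: t) n = List.replicate (n.toNat - (c :: t).length) '0' ++ (c :: t) := by
  rw [PySem.Chars.zfill]
  by_cases hle : n ≤ ((c :: t).length : Int)
  · rw [if_pos hle]
    have : n.toNat - (c :: t).length = 0 := by omega
    rw [this]
    rfl
  · rw [if_neg hle, if_neg hc]

lemma row_eq (m : Nat) (n : Int) (hn : 1 ≤ n) :
    PySem.Chars.replace (PySem.Chars.replace
        (PySem.Chars.zfill (PySem.List.slice (PySem.Int.toBinChars0b (m : Int)) (some 2) none) n)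
        ['1'] ['#']) ['0'] [' ']
      = List.replicate (n - ((rowGo m []).length : Int)).toNat ' ' ++ rowGo m [] := by
  have hslice : PySem.List.slice (PySem.Int.toBinChars0b (m : Int)) (some 2) none = binChars m := by
    rw [PySem.List.slice_from _ (by norm_num : (0 : Int) ≤ 2)]
    rw [PySem.Int.toBinChars0b, if_neg (by omega : ¬ (m : Int) < 0), Int.toNat_natCast,
      toDigits_eq_binChars]
    rfl
  rw [hslice]
  by_cases hm : m = 0
  · subst hm
    have h0 : binChars 0 = ['0'] := by
      rw [binChars, if_pos (by norm_num : (0 : Nat) < 2)]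
      decide
    have hr0 : rowGo 0 [] = [] := by rw [rowGo]; rfl
    rw [h0, hr0, zfill_no_sign '0' [] n (by decide), replace_single, replace_single]
    simp only [List.length_cons, List.length_nil, List.map_append, List.map_replicate,
      List.map_cons, List.map_nil, List.append_nil, Int.natCast_zero, sub_zero]
    rw [show n.toNat = (n.toNat - 1) + 1 from by omega, List.replicate_succ',
      show (if (if '0' = '1' then '#' else '0') = '0' then ' '
        else if '0' = '1' then '#' else '0') = ' ' from by decide,
      show n.toNat - 1 + 1 - (0 + 1) = n.toNat - 1 from by omega]

  · obtain ⟨t, ht⟩ := binChars_head m (by omega)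
    rw [rowGo_eq m (by omega) [], List.append_nil, ht, zfill_no_sign '1' t n (by decide),
      replace_single, replace_single, List.map_map, comp_repl, List.map_append,
      List.map_replicate]
    have hre : repl '0' = ' ' := by decide
    rw [hre]
    have hlen : (n - (((('1' :: t).map repl).length : Nat) : Int)).toNat
        = n.toNat - ('1' :: t).length := by
      simp only [List.length_map]
      omega
    rw [hlen]

-- ===== VERDICT (by name: the statement is the Claim_ definition above) =====
theorem solution_spec : Claim_equal_solution := by
  intro n arr1 arr2 _hdom hpre
  unfold Spec_solution solution solution_alt
  simp only [PySem.List.foldl_append_singleton_eq_map, List.nil_append, List.map_map]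
  apply List.map_congr_left
  intro i hi
  obtain ⟨hi0, hin⟩ := PySem.List.mem_pyRange_one.mp hi
  obtain ⟨h1, h2, h3⟩ := hpre
  have hlt1 : i < (arr1.length : Int) := lt_of_lt_of_le hin h1
  have hlt2 : i < (arr2.length : Int) := lt_of_lt_of_le hin h2
  simp only [Function.comp]
  rw [PySem.List.pyGetD_eq_getElem arr1 0 hi0 hlt1, PySem.List.pyGetD_eq_getElem arr2 0 hi0 hlt2]
  have hj : i.toNat < n.toNat := by omega
  obtain ⟨ha, hb⟩ := h3 i.toNat hj
  rw [List.getD_eq_getElem arr1 0 (by omega)] at ha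
  rw [List.getD_eq_getElem arr2 0 (by omega)] at hb
  rw [PySem.Int.bor_of_nonneg ha hb, Int.toNat_natCast]
  exact congrArg String.ofList (row_eq _ n (by omega))
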